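-- pv_equiv track=rewrite | github.com/craftsmanadam/campaign_narrator | app/campaignnarrator/orchestrators/combat_orchestrator.py | _extract_roll_totals
-- ===== SOURCE A (Python) =====
-- def _extract_roll_totals(
--     roll_totals_by_purpose: dict[str, int],
-- ) -> tuple[int | None, int | None]:
--     """Return (attack_total, damage_total) from a purpose→total mapping."""
--     attack_total: int | None = None
--     damage_total: int | None = None
--     for purpose, total in roll_totals_by_purpose.items():
--         lower = purpose.lower()
--         if lower.startswith("attack roll"):
--             attack_total = total
--         elif lower.startswith("damage"):
--             damage_total = total
--     return attack_total, damage_total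
-- ===== SOURCE B (Python) =====
-- def _extract_roll_totals(
--     roll_totals_by_purpose: dict[str, int],
-- ) -> tuple[int | None, int | None]:
--     """Return (attack_total, damage_total) from a purpose->total mapping."""
--     items = list(roll_totals_by_purpose.items())
--     attack_total = next(
--         (total for purpose, total in reversed(items)
--          if purpose.lower().startswith("attack roll")),
--         None,
--     )
--     damage_total = next(
--         (total for purpose, total in reversed(items)
--          if purpose.lower().startswith("damage")),
--         None,
--     )
--     return attack_total, damage_total
-- ===== Notes on version B (the rewrite author's own statement) =====
-- stated objective: idiomatic
-- what changed: Replaces the single forward overwriting loop with two independent reverse scans that each take the first matching entry (last match in forward order), dropping the mutable state and the elif (no key can start with both prefixes).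
import Mathlib
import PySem

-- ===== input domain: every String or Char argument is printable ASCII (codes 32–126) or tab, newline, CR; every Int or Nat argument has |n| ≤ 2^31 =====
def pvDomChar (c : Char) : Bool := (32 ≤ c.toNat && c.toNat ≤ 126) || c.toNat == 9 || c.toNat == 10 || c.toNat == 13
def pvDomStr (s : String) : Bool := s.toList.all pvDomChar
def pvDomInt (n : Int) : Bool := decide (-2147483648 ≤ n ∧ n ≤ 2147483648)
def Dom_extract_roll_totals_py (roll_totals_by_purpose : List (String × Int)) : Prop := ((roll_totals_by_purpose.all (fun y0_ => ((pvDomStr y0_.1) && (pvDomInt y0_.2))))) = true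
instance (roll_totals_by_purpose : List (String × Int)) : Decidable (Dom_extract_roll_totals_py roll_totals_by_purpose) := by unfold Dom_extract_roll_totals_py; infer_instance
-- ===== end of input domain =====

-- ===== PORT A =====
-- B replaces A's single forward overwriting loop by two independent reverse first-match scans (idiomatic decomposition; same cost).
def extract_roll_totals_py (roll_totals_by_purpose : List (String × Int)) : Option Int × Option Int :=
  roll_totals_by_purpose.foldl
    (fun st kv =>
      let lower := PySem.Str.lower kv.1
      if PySem.Str.startswith lower "attack roll" then (some kv.2, st.2)
      else if PySem.Str.startswith lower "damage" then (st.1, some kv.2)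
      else st)
    (none, none)

-- ===== PORT B =====
def extract_roll_totals_py_alt (roll_totals_by_purpose : List (String × Int)) : Option Int × Option Int :=
  (((roll_totals_by_purpose.reverse.find?
      (fun kv => PySem.Str.startswith (PySem.Str.lower kv.1) "attack roll")).map (·.2)),
   ((roll_totals_by_purpose.reverse.find?
      (fun kv => PySem.Str.startswith (PySem.Str.lower kv.1) "damage")).map (·.2)))

-- ===== PRECONDITION & SPEC =====
def Spec_extract_roll_totals_py (roll_totals_by_purpose : List (String × Int)) (out : Option Int × Option Int) : Prop := out = extract_roll_totals_py_alt roll_totals_by_purpose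
instance (roll_totals_by_purpose : List (String × Int)) (out : Option Int × Option Int) : Decidable (Spec_extract_roll_totals_py roll_totals_by_purpose out) := by unfold Spec_extract_roll_totals_py; infer_instance

-- ===== CLAIM (what is proved, stated in full; the proofs are below) =====
def Claim_equal_extract_roll_totals_py : Prop := ∀ (roll_totals_by_purpose : List (String × Int)), Dom_extract_roll_totals_py roll_totals_by_purpose → Spec_extract_roll_totals_py roll_totals_by_purpose (extract_roll_totals_py roll_totals_by_purpose)

-- ===== LEMMAS AND PROOFS =====

-- ===== VERDICT (by name: the statement is the Claim_ definition above) =====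
-- no printable-ASCII string's lowercase starts with both "attack roll" and "damage"
lemma pv_disjoint (s : String) :
    PySem.Str.startswith (PySem.Str.lower s) "attack roll" = true →
    PySem.Str.startswith (PySem.Str.lower s) "damage" = true → False := by
  intro hA hD
  rw [PySem.Str.startswith_eq, PySem.Chars.startswith_iff] at hA hD
  rcases hA with ⟨tA, hA⟩
  rcases hD with ⟨tD, hD⟩
  rw [← hA] at hD
  simp at hD

lemma pv_main (l : List (String × Int)) :
    ∀ (a d : Option Int),
    l.foldl
      (fun st kv =>
        let lower := PySem.Str.lower kv.1
        if PySem.Str.startswith lower "attack roll" then (some kv.2, st.2)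
        else if PySem.Str.startswith lower "damage" then (st.1, some kv.2)
        else st)
      (a, d)
    = (((l.reverse.find?
          (fun kv => PySem.Str.startswith (PySem.Str.lower kv.1) "attack roll")).map (·.2)).or a,
       ((l.reverse.find?
          (fun kv => PySem.Str.startswith (PySem.Str.lower kv.1) "damage")).map (·.2)).or d) := by
  induction l with
  | nil => intro a d; simp
  | cons x xs ih =>
    intro a d
    simp only [List.foldl_cons, List.reverse_cons, List.find?_append]
    rw [ih]
    by_cases hA : PySem.Str.startswith (PySem.Str.lower x.1) "attack roll" = true
    · have hD : PySem.Str.startswith (PySem.Str.lower x.1) "damage" = false := by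
        by_contra h
        exact pv_disjoint x.1 hA (by simpa using h)
      simp only [hA, hD, if_true, List.find?_singleton]
      cases xs.reverse.find? (fun kv => PySem.Str.startswith (PySem.Str.lower kv.1) "attack roll") <;>
        cases xs.reverse.find? (fun kv => PySem.Str.startswith (PySem.Str.lower kv.1) "damage") <;>
        simp
    · simp only [hA, List.find?_singleton]
      by_cases hD : PySem.Str.startswith (PySem.Str.lower x.1) "damage" = true <;>
        cases xs.reverse.find? (fun kv => PySem.Str.startswith (PySem.Str.lower kv.1) "attack roll") <;>
        cases xs.reverse.find? (fun kv => PySem.Str.startswith (PySem.Str.lower kv.1) "damage") <;>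
        simp_all

theorem extract_roll_totals_py_spec : Claim_equal_extract_roll_totals_py := by
  intro l _
  show extract_roll_totals_py l = extract_roll_totals_py_alt l
  unfold extract_roll_totals_py extract_roll_totals_py_alt
  rw [pv_main]
  cases l.reverse.find? (fun kv => PySem.Str.startswith (PySem.Str.lower kv.1) "attack roll") <;>
    cases l.reverse.find? (fun kv => PySem.Str.startswith (PySem.Str.lower kv.1) "damage") <;> simp
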